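-- pv_equiv track=rewrite | github.com/RQM-Technologies-dev/rqm-tech-papers | scripts/render_paper_html.py | render_template_index_links
-- ===== SOURCE A (Python) =====
-- def render_template_index_links(template_index: str) -> str:
--     replacements = {
--         'href="paper.html"': 'href="/papers/SERIES-NNN-slug/paper.html"',
--         'href="paper.pdf"': 'href="/papers/SERIES-NNN-slug/paper.pdf"',
--         'href="main.tex"': 'href="/papers/SERIES-NNN-slug/main.tex"',
--         'href="metadata.json"': 'href="/papers/SERIES-NNN-slug/metadata.json"',
--         'href="paper.jats.xml"': 'href="/papers/SERIES-NNN-slug/paper.jats.xml"',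
--         'href="claims.json"': 'href="/papers/SERIES-NNN-slug/claims.json"',
--         'href="notation.json"': 'href="/papers/SERIES-NNN-slug/notation.json"',
--         'href="glossary.json"': 'href="/papers/SERIES-NNN-slug/glossary.json"',
--         'href="references.bib"': 'href="/papers/SERIES-NNN-slug/references.bib"',
--         'href="CITATION.cff"': 'href="/papers/SERIES-NNN-slug/CITATION.cff"',
--         'href="README.md"': 'href="/papers/SERIES-NNN-slug/README.md"',
--         'href="artifacts/figures/"': 'href="/papers/SERIES-NNN-slug/artifacts/figures/"',
--         'href="artifacts/notebooks/"': 'href="/papers/SERIES-NNN-slug/artifacts/notebooks/"',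
--         'href="artifacts/code/"': 'href="/papers/SERIES-NNN-slug/artifacts/code/"',
--     }
--     for old, new in replacements.items():
--         template_index = template_index.replace(old, new)
--     return template_index
-- ===== SOURCE B (Python) =====
-- NAMES = (
--     "paper.html", "paper.pdf", "main.tex", "metadata.json",
--     "paper.jats.xml", "claims.json", "notation.json", "glossary.json",
--     "references.bib", "CITATION.cff", "README.md",
--     "artifacts/figures/", "artifacts/notebooks/", "artifacts/code/",
-- )
--
-- PAIRS = [('href="%s"' % name, 'href="/papers/SERIES-NNN-slug/%s"' % name)
--          for name in NAMES]
--
--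
-- def render_template_index_links(template_index: str) -> str:
--     # One left-to-right scan: at each position emit the replacement for the
--     # first matching target, or copy the character through.
--     s = template_index
--     out = []
--     i = 0
--     n = len(s)
--     while i < n:
--         for old, new in PAIRS:
--             if s.startswith(old, i):
--                 out.append(new)
--                 i += len(old)
--                 break
--         else:
--             out.append(s[i])
--             i += 1
--     return "".join(out)
-- ===== Notes on version B (the rewrite author's own statement) =====
-- stated objective: alternative
-- what changed: Replaces A's 14 sequential whole-string str.replace passes by a single left-to-right scan that, at each position, emits the replacement for the first matching 'href="..."' target or copies the character through (correct because targets never overlap each other and replacements never create new matches).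
import Mathlib
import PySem

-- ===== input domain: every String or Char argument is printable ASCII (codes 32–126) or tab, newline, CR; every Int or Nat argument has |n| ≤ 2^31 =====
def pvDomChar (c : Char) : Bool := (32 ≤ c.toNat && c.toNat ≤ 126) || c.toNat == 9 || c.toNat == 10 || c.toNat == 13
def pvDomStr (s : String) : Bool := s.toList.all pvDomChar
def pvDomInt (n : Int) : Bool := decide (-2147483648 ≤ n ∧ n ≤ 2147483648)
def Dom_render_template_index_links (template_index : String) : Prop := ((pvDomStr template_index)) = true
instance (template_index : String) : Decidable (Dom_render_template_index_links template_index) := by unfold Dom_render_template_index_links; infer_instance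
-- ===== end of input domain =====

-- B replaces A's 14 sequential str.replace passes by ONE left-to-right scan that rewrites
-- the first matching target at each position (alternative single-pass algorithm, same result).

-- ===== PORT A =====
-- Python dict literal → association list in insertion order
def pvReplacementsA : List (String × String) :=
  [ ("href=\"paper.html\"", "href=\"/papers/SERIES-NNN-slug/paper.html\""),
    ("href=\"paper.pdf\"", "href=\"/papers/SERIES-NNN-slug/paper.pdf\""),
    ("href=\"main.tex\"", "href=\"/papers/SERIES-NNN-slug/main.tex\""),
    ("href=\"metadata.json\"", "href=\"/papers/SERIES-NNN-slug/metadata.json\""),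
    ("href=\"paper.jats.xml\"", "href=\"/papers/SERIES-NNN-slug/paper.jats.xml\""),
    ("href=\"claims.json\"", "href=\"/papers/SERIES-NNN-slug/claims.json\""),
    ("href=\"notation.json\"", "href=\"/papers/SERIES-NNN-slug/notation.json\""),
    ("href=\"glossary.json\"", "href=\"/papers/SERIES-NNN-slug/glossary.json\""),
    ("href=\"references.bib\"", "href=\"/papers/SERIES-NNN-slug/references.bib\""),
    ("href=\"CITATION.cff\"", "href=\"/papers/SERIES-NNN-slug/CITATION.cff\""),
    ("href=\"README.md\"", "href=\"/papers/SERIES-NNN-slug/README.md\""),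
    ("href=\"artifacts/figures/\"", "href=\"/papers/SERIES-NNN-slug/artifacts/figures/\""),
    ("href=\"artifacts/notebooks/\"", "href=\"/papers/SERIES-NNN-slug/artifacts/notebooks/\""),
    ("href=\"artifacts/code/\"", "href=\"/papers/SERIES-NNN-slug/artifacts/code/\"") ]

def render_template_index_links (template_index : String) : String :=
  pvReplacementsA.foldl (fun s p => PySem.Str.replace s p.1 p.2) template_index

-- ===== PORT B =====
def pvNamesB : List String :=
  [ "paper.html", "paper.pdf", "main.tex", "metadata.json",
    "paper.jats.xml", "claims.json", "notation.json", "glossary.json",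
    "references.bib", "CITATION.cff", "README.md",
    "artifacts/figures/", "artifacts/notebooks/", "artifacts/code/" ]

def pvPairsB : List (List Char × List Char) :=
  pvNamesB.map (fun nm =>
    ("href=\"".toList ++ nm.toList ++ ['"'],
     "href=\"/papers/SERIES-NNN-slug/".toList ++ nm.toList ++ ['"']))

-- the inner `for old, new in PAIRS: if s.startswith(old, i)` loop: first matching pair
def pvFindPair (ps : List (List Char × List Char)) (l : List Char) :
    Option (List Char × List Char) :=
  ps.find? (fun p => p.1.isPrefixOf l)

-- the `while i < n` loop of Source B: emit replacement and jump, or copy one char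
def pvScan (ps : List (List Char × List Char)) : List Char → List Char
  | [] => []
  | c :: t =>
    match pvFindPair ps (c :: t) with
    | some (o, n) => n ++ pvScan ps (List.drop (o.length - 1) t)
    | none => c :: pvScan ps t
termination_by l => l.length
decreasing_by
  · simp only [List.length_drop, List.length_cons]; omega
  · simp

def render_template_index_links_alt (template_index : String) : String :=
  String.ofList (pvScan pvPairsB template_index.toList)

-- ===== PRECONDITION & SPEC =====
def Spec_render_template_index_links (template_index : String) (out : String) : Prop := out = render_template_index_links_alt template_index
instance (template_index : String) (out : String) : Decidable (Spec_render_template_index_links template_index out) := by unfold Spec_render_template_index_links; infer_instance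

-- ===== CLAIM (what is proved, stated in full; the proofs are below) =====
def Claim_equal_render_template_index_links : Prop := ∀ (template_index : String), Dom_render_template_index_links template_index → Spec_render_template_index_links template_index (render_template_index_links template_index)

-- ===== LEMMAS AND PROOFS =====

-- structural form of Python str.replace (old ≠ []): replace first match, continue after it
def pvRep (old new : List Char) : List Char → List Char
  | [] => []
  | c :: t =>
    if old.isPrefixOf (c :: t) then new ++ pvRep old new (List.drop (old.length - 1) t)
    else c :: pvRep old new t
termination_by l => l.length
decreasing_by
  · simp only [List.length_drop, List.length_cons]; omega
  · simp

theorem pvGo_eq_pvRep (old new : List Char) (ho : old ≠ []) :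
    ∀ (fuel : Nat) (l acc : List Char), l.length ≤ fuel →
      PySem.Chars.replace.go old new fuel l acc = acc.reverse ++ pvRep old new l := by
  intro fuel
  induction fuel with
  | zero =>
      intro l acc hl
      have : l = [] := List.eq_nil_of_length_eq_zero (Nat.le_zero.mp hl)
      subst this
      rw [PySem.Chars.replace.go.eq_def, pvRep]
  | succ f ih =>
      intro l acc hl
      cases l with
      | nil => rw [PySem.Chars.replace.go.eq_def, pvRep]; simp
      | cons c t =>
          rw [PySem.Chars.replace.go.eq_def]
          dsimp only
          rw [pvRep]
          by_cases hp : old.isPrefixOf (c :: t) = true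
          · rw [if_pos hp]
            have hdrop : List.drop old.length (c :: t) = List.drop (old.length - 1) t := by
              obtain ⟨a, o', rfl⟩ := List.exists_cons_of_ne_nil ho
              simp [List.drop_succ_cons]
            rw [hdrop]
            have hle : (List.drop (old.length - 1) t).length ≤ f := by
              simp only [List.length_drop]
              simp only [List.length_cons] at hl
              omega
            rw [ih _ _ hle]
            simp
            exact fun hc => absurd (List.isPrefixOf_iff_prefix.mp hp) hc
          · rw [if_neg hp]
            have hle : t.length ≤ f := by
              simp only [List.length_cons] at hl; omega
            rw [ih _ _ hle]
            simp
            exact fun hc => absurd (List.isPrefixOf_iff_prefix.mpr hc) hp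

theorem pvReplace_eq_pvRep (s old new : List Char) (ho : old ≠ []) :
    PySem.Chars.replace s old new = pvRep old new s := by
  unfold PySem.Chars.replace
  rw [if_neg (by simp [List.isEmpty_iff, ho])]
  rw [pvGo_eq_pvRep old new ho s.length s [] (le_refl _)]
  simp

-- two prefixes of the same list are comparable; hence a prefix of u ++ X is comparable with u
theorem pvPrefix_append_cases {a u X : List Char} (h : a <+: u ++ X) :
    a <+: u ∨ u <+: a :=
  List.prefix_or_prefix_of_prefix h (List.prefix_append u X)

theorem pvRep_append (o n u X : List Char)
    (h : ∀ k, k < u.length → ¬ o <+: (List.drop k u ++ X)) :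
    pvRep o n (u ++ X) = u ++ pvRep o n X := by
  induction u with
  | nil => simp
  | cons c u' ih =>
      rw [List.cons_append, pvRep]
      have h0 : ¬ o <+: (c :: u' ++ X) := by
        have := h 0 (by simp)
        simpa using this
      rw [if_neg (by simp [List.isPrefixOf_iff_prefix]; exact fun hc => h0 (by simpa using hc))]
      rw [ih (fun k hk => by simpa using h (k + 1) (by simp; omega))]
      simp

-- a scan makes no change while no target matches
theorem pvScan_skip (S : List (List Char × List Char)) :
    ∀ (m : Nat) (l : List Char), m ≤ l.length →
      (∀ k, k < m → ∀ p ∈ S, ¬ p.1 <+: List.drop k l) →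
      pvScan S l = List.take m l ++ pvScan S (List.drop m l) := by
  intro m
  induction m with
  | zero => intro l _ _; simp
  | succ m' ih =>
      intro l hl hno
      cases l with
      | nil => simp at hl
      | cons c t =>
          have hnone : pvFindPair S (c :: t) = none := by
            unfold pvFindPair
            rw [List.find?_eq_none]
            intro p hp
            simp only [List.isPrefixOf_iff_prefix]
            intro hc
            exact hno 0 (by omega) p hp (by simpa using hc)
          rw [pvScan, hnone]
          simp only [List.take_succ_cons, List.drop_succ_cons, List.cons_append]
          congr 1
          apply ih t (by simpa using Nat.lt_succ_iff.mp (Nat.lt_of_lt_of_le (Nat.lt_succ_of_le (le_refl _)) hl))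
          intro k hk p hp
          have := hno (k + 1) (by omega) p hp
          simpa using this

-- a proper suffix of a target cannot begin in scanned output unless it begins in the input
theorem pvScanPrefixBack (S : List (List Char × List Char)) (o : List Char)
    (h5 : ∀ p ∈ S, ∀ k, 0 < k → k < o.length →
      ¬(List.drop k o <+: p.2) ∧ ¬(p.2 <+: List.drop k o)) :
    ∀ (t : List Char) (m : Nat), 0 < m → m < o.length →
      List.drop m o <+: pvScan S t → List.drop m o <+: t := by
  intro t
  induction t with
  | nil =>
      intro m hm hmo h
      rw [pvScan] at h
      have : List.drop m o = [] := List.prefix_nil.mp h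
      have : o.length - m = 0 := by simpa [List.length_drop] using congrArg List.length this
      omega
  | cons c t' ih =>
      intro m hm hmo h
      rw [pvScan] at h
      cases hf : pvFindPair S (c :: t') with
      | some pr =>
          rcases pr with ⟨pj, nj⟩
          rw [hf] at h
          have hmem : (pj, nj) ∈ S := by
            unfold pvFindPair at hf
            exact List.mem_of_find?_eq_some hf
          rcases pvPrefix_append_cases h with hc | hc
          · exact absurd hc (h5 _ hmem m hm hmo).1
          · exact absurd hc (h5 _ hmem m hm hmo).2
      | none =>
          rw [hf] at h
          have hd : List.drop m o = o[m] :: List.drop (m + 1) o :=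
            List.drop_eq_getElem_cons hmo
          rw [hd] at h
          rcases (List.cons_prefix_cons.mp h) with ⟨hc, hrest⟩
          by_cases hend : m + 1 = o.length
          · have : List.drop (m + 1) o = [] := by
              rw [hend]; simp
            rw [hd, this, hc]
            exact ⟨t', by simp⟩
          · have := ih (m + 1) (by omega) (by omega) hrest
            rw [hd, hc]
            exact List.cons_prefix_cons.mpr ⟨rfl, this⟩

-- the MAIN lemma: one more sequential replace pass over scanned output = scan with one more pair
theorem pvMain (S : List (List Char × List Char)) (o n : List Char)
    (ho : o ≠ [])
    (h3 : ∀ p ∈ S, ∀ k, k < p.2.length →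
      ¬(List.drop k p.2 <+: o) ∧ ¬(o <+: List.drop k p.2))
    (h4 : ∀ p ∈ S, ∀ k, 0 < k → k < o.length →
      ¬(List.drop k o <+: p.1) ∧ ¬(p.1 <+: List.drop k o))
    (h5 : ∀ p ∈ S, ∀ k, 0 < k → k < o.length →
      ¬(List.drop k o <+: p.2) ∧ ¬(p.2 <+: List.drop k o)) :
    ∀ s, pvRep o n (pvScan S s) = pvScan (S ++ [(o, n)]) s := by
  have main : ∀ (N : Nat) (s : List Char), s.length ≤ N →
      pvRep o n (pvScan S s) = pvScan (S ++ [(o, n)]) s := by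
    intro N
    induction N with
    | zero =>
        intro s hs
        have : s = [] := List.eq_nil_of_length_eq_zero (Nat.le_zero.mp hs)
        subst this
        rw [pvScan, pvScan, pvRep]
    | succ N ih =>
        intro s hs
        cases s with
        | nil => rw [pvScan, pvScan, pvRep]
        | cons c t =>
            have htN : t.length ≤ N := by simpa using Nat.lt_succ_iff.mp (by simpa using hs)
            cases hf : pvFindPair S (c :: t) with
            | some pr =>
                rcases pr with ⟨pj, nj⟩
                have hmem : (pj, nj) ∈ S := by
                  unfold pvFindPair at hf
                  exact List.mem_of_find?_eq_some hf
                have hfext : pvFindPair (S ++ [(o, n)]) (c :: t) = some (pj, nj) := by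
                  unfold pvFindPair at hf ⊢
                  rw [List.find?_append, hf]
                  rfl
                rw [pvScan, hf, pvScan, hfext]
                simp only
                have hno : ∀ k, k < nj.length →
                    ¬ o <+: (List.drop k nj ++ pvScan S (List.drop (pj.length - 1) t)) := by
                  intro k hk hpre
                  rcases pvPrefix_append_cases hpre with hc | hc
                  · exact (h3 _ hmem k hk).2 hc
                  · exact (h3 _ hmem k hk).1 hc
                rw [pvRep_append o n nj _ hno]
                congr 1
                apply ih
                simp only [List.length_drop]
                omega
            | none =>
                have hnoS : ∀ p ∈ S, ¬ p.1 <+: (c :: t) := by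
                  intro p hp hc
                  unfold pvFindPair at hf
                  rw [List.find?_eq_none] at hf
                  have hx := hf p hp
                  simp only [List.isPrefixOf_iff_prefix] at hx
                  exact hx hc
                by_cases hpre : o <+: (c :: t)
                · -- the new pair matches here
                  have hfext : pvFindPair (S ++ [(o, n)]) (c :: t) = some (o, n) := by
                    unfold pvFindPair at hf ⊢
                    rw [List.find?_append, hf]
                    simp [List.isPrefixOf_iff_prefix, hpre]
                  set m := o.length - 1 with hm
                  have holen : o.length = m + 1 := by
                    cases o with
                    | nil => exact absurd rfl ho
                    | cons a b => simp [hm]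
                  have hmt : m ≤ t.length := by
                    have := hpre.length_le
                    simp only [List.length_cons] at this
                    omega
                  have hoeq : o = c :: List.take m t := by
                    have := List.prefix_iff_eq_take.mp hpre
                    rw [holen] at this
                    simpa [List.take_succ_cons] using this
                  have hskip : pvScan S t = List.take m t ++ pvScan S (List.drop m t) := by
                    apply pvScan_skip S m t hmt
                    intro k hk p hp hc
                    have hdp : List.drop (k + 1) o <+: List.drop k t := by
                      rcases hpre with ⟨r, hr⟩
                      have : List.drop (k + 1) (c :: t) = List.drop (k + 1) o ++ r := by
                        rw [← hr, List.drop_append_of_le_length (by omega)]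
                      refine ⟨r, ?_⟩
                      simpa [List.drop_succ_cons] using this.symm
                    rcases List.prefix_or_prefix_of_prefix hdp hc with hx | hx
                    · exact (h4 p hp (k + 1) (by omega) (by omega)).1 hx
                    · exact (h4 p hp (k + 1) (by omega) (by omega)).2 hx
                  rw [pvScan, hf, pvScan, hfext]
                  simp only
                  rw [hskip, ← List.cons_append, ← hoeq]
                  -- pvRep over o ++ Y
                  rcases o with _ | ⟨a, o'⟩
                  · exact absurd rfl ho
                  · rw [List.cons_append, pvRep]
                    rw [if_pos (by simp [List.isPrefixOf_iff_prefix])]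
                    have hdy : List.drop ((a :: o').length - 1) (o' ++ pvScan S (List.drop m t)) =
                        pvScan S (List.drop m t) := by
                      simp [List.drop_left']
                    rw [hdy]
                    congr 1
                    have : (a :: o').length - 1 = m := by
                      simp only [List.length_cons] at holen ⊢
                      omega
                    rw [ih (List.drop m t) (by simp; omega), this]
                · -- no pair matches here
                  have hfext : pvFindPair (S ++ [(o, n)]) (c :: t) = none := by
                    unfold pvFindPair at hf ⊢
                    rw [List.find?_append, hf]
                    simp [List.isPrefixOf_iff_prefix, hpre]
                  rw [pvScan, hf, pvScan, hfext]
                  have hnop : ¬ o <+: c :: pvScan S t := by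
                    intro hc
                    rcases o with _ | ⟨a, o'⟩
                    · exact absurd rfl ho
                    · rcases List.cons_prefix_cons.mp hc with ⟨hac, hrest⟩
                      subst hac
                      rcases o' with _ | ⟨b, o''⟩
                      · exact hpre ⟨t, by simp⟩
                      · have : List.drop 1 (a :: b :: o'') <+: t := by
                          apply pvScanPrefixBack S (a :: b :: o'') h5 t 1 (by omega) (by simp)
                          simpa using hrest
                        exact hpre (List.cons_prefix_cons.mpr ⟨rfl, by simpa using this⟩)
                  rw [pvRep]
                  rw [if_neg (by simp [List.isPrefixOf_iff_prefix]; exact fun hc => hnop hc)]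
                  rw [ih t htN]
  intro s
  exact main s.length s (le_refl _)

-- Bool-checkable hypothesis bundle for one chain step
def pvNoPre (a b : List Char) : Bool := decide (¬(a <+: b) ∧ ¬(b <+: a))

def pvHypsB (S : List (List Char × List Char)) (o : List Char) : Bool :=
  (decide (o ≠ [])) && S.all (fun p =>
    (List.range p.2.length).all (fun k => pvNoPre (List.drop k p.2) o)
    && (List.range o.length).all (fun k =>
        (k == 0) || (pvNoPre (List.drop k o) p.1 && pvNoPre (List.drop k o) p.2)))

def pvOkFromB : List (List Char × List Char) → List (List Char × List Char) → Bool
  | _, [] => true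
  | done, p :: rest => pvHypsB done p.1 && pvOkFromB (done ++ [p]) rest

theorem pvScan_nil_pairs : ∀ l, pvScan [] l = l := by
  intro l
  induction l with
  | nil => rw [pvScan]
  | cons c t ih =>
      rw [pvScan]
      have : pvFindPair [] (c :: t) = none := rfl
      rw [this, ih]

theorem pvHypsB_extract (S : List (List Char × List Char)) (o : List Char)
    (h : pvHypsB S o = true) :
    o ≠ [] ∧
    (∀ p ∈ S, ∀ k, k < p.2.length → ¬(List.drop k p.2 <+: o) ∧ ¬(o <+: List.drop k p.2)) ∧
    (∀ p ∈ S, ∀ k, 0 < k → k < o.length → ¬(List.drop k o <+: p.1) ∧ ¬(p.1 <+: List.drop k o)) ∧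
    (∀ p ∈ S, ∀ k, 0 < k → k < o.length → ¬(List.drop k o <+: p.2) ∧ ¬(p.2 <+: List.drop k o)) := by
  unfold pvHypsB pvNoPre at h
  simp only [Bool.and_eq_true, List.all_eq_true, List.mem_range, Bool.or_eq_true, beq_iff_eq,
    decide_eq_true_eq] at h
  obtain ⟨ho, hrest⟩ := h
  refine ⟨ho, ?_, ?_, ?_⟩
  · intro p hp k hk
    exact (hrest p hp).1 k hk
  · intro p hp k hk0 hk
    rcases (hrest p hp).2 k hk with h0 | hh
    · omega
    · exact hh.1
  · intro p hp k hk0 hk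
    rcases (hrest p hp).2 k hk with h0 | hh
    · omega
    · exact hh.2

theorem pvChain : ∀ (ps done : List (List Char × List Char)),
    pvOkFromB done ps = true → ∀ L,
    List.foldl (fun l p => pvRep p.1 p.2 l) (pvScan done L) ps = pvScan (done ++ ps) L := by
  intro ps
  induction ps with
  | nil => intro done _ L; simp
  | cons p rest ih =>
      intro done hok L
      unfold pvOkFromB at hok
      rw [Bool.and_eq_true] at hok
      obtain ⟨h1, h2⟩ := hok
      obtain ⟨ho, h3, h4, h5⟩ := pvHypsB_extract done p.1 h1
      rw [List.foldl_cons]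
      rw [pvMain done p.1 p.2 ho h3 h4 h5 L]
      have := ih (done ++ [p]) h2 L
      rw [show done ++ [p] ++ rest = done ++ p :: rest by simp] at this
      exact this

theorem pvToList_foldl_replace : ∀ (ps : List (String × String)) (s : String),
    (List.foldl (fun s p => PySem.Str.replace s p.1 p.2) s ps).toList
      = List.foldl (fun l p => PySem.Chars.replace l p.1 p.2) s.toList
          (ps.map (fun p => (p.1.toList, p.2.toList))) := by
  intro ps
  induction ps with
  | nil => intro s; simp
  | cons p rest ih =>
      intro s
      rw [List.map_cons, List.foldl_cons, List.foldl_cons, ← PySem.Str.toList_replace]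
      exact ih _

theorem pvFoldl_chars_eq_pvRep : ∀ (ps : List (List Char × List Char)) (l : List Char),
    (∀ p ∈ ps, p.1 ≠ []) →
    List.foldl (fun l p => PySem.Chars.replace l p.1 p.2) l ps
      = List.foldl (fun l p => pvRep p.1 p.2 l) l ps := by
  intro ps
  induction ps with
  | nil => intro l _; rfl
  | cons p rest ih =>
      intro l h
      rw [List.foldl_cons, List.foldl_cons,
        pvReplace_eq_pvRep l p.1 p.2 (h p (by simp))]
      exact ih _ (fun q hq => h q (List.mem_cons_of_mem _ hq))

-- ===== VERDICT (by name: the statement is the Claim_ definition above) =====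
theorem render_template_index_links_spec : Claim_equal_render_template_index_links := by
  intro s _
  unfold Spec_render_template_index_links render_template_index_links render_template_index_links_alt
  apply String.toList_inj.mp
  rw [pvToList_foldl_replace]
  rw [pvFoldl_chars_eq_pvRep _ _ (by decide)]
  rw [String.toList_ofList]
  have hpairs : pvReplacementsA.map (fun p => (p.1.toList, p.2.toList)) = pvPairsB := by decide
  rw [hpairs]
  have := pvChain pvPairsB [] (by decide) s.toList
  rw [pvScan_nil_pairs] at this
  simpa using this
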